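-- pv_equiv track=rewrite | github.com/Tejas7007/Tejas7007-circuit-scaling | scripts/sae_feature_overlap.py | get_ioi_prompts
-- ===== SOURCE A (Python) =====
-- def get_ioi_prompts(n: int = 64):
--     """
--     Very small hard-coded IOI-style prompts. For serious analysis, you should
--     reuse your full IOI dataset, but this keeps the script self-contained.
--
--     We just cycle over a small template list until we reach n prompts.
--     """
--     templates = [
--         "When John met Mary, John greeted Mary.",
--         "When Alice visited Bob, Alice thanked Bob.",
--         "After Sarah called David, Sarah reminded David.",
--         "Before Emma emailed Noah, Emma called Noah.",
--     ]
--     prompts = []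
--     i = 0
--     while len(prompts) < n:
--         prompts.append(templates[i % len(templates)])
--         i += 1
--     return prompts
-- ===== SOURCE B (Python) =====
-- def get_ioi_prompts(n: int = 64):
--     """Build n IOI prompts by bulk replication of the template list and truncation."""
--     templates = [
--         "When John met Mary, John greeted Mary.",
--         "When Alice visited Bob, Alice thanked Bob.",
--         "After Sarah called David, Sarah reminded David.",
--         "Before Emma emailed Noah, Emma called Noah.",
--     ]
--     reps = n // len(templates) + 1
--     return (templates * reps)[:n]
-- ===== Notes on version B (the rewrite author's own statement) =====
-- stated objective: simpler
-- what changed: Replaces the incremental while-loop with per-element modulo indexing by a single bulk construction: replicate the template list ceil-many times and slice to length n.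
import Mathlib
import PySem

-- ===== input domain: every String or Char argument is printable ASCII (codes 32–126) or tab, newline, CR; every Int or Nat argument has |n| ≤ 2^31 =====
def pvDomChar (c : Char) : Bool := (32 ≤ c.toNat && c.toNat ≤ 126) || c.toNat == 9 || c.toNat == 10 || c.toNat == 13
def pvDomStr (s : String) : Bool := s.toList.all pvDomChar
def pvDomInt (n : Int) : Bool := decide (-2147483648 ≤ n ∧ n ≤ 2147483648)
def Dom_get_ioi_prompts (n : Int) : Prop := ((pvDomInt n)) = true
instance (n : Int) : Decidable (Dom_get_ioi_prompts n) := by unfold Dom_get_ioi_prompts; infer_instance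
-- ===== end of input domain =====

-- B replaces A's element-by-element while-loop by bulk replication plus one slice (objective: simpler).

-- ===== PORT A =====
def pvTemplates : List String :=
  [ "When John met Mary, John greeted Mary.",
    "When Alice visited Bob, Alice thanked Bob.",
    "After Sarah called David, Sarah reminded David.",
    "Before Emma emailed Noah, Emma called Noah." ]

-- the while loop of A; templates[i % len(templates)] is always in range, so getD's default is never used
def pvLoopA (n : Int) (prompts : List String) (i : Nat) : List String :=
  if (prompts.length : Int) < n then
    pvLoopA n (prompts ++ [pvTemplates.getD (i % pvTemplates.length) ""]) (i + 1)
  else prompts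
termination_by (n - prompts.length).toNat
decreasing_by simp only [List.length_append, List.length_cons, List.length_nil]; omega

def get_ioi_prompts (n : Int) : List String := pvLoopA n [] 0

-- ===== PORT B =====
def get_ioi_prompts_alt (n : Int) : List String :=
  PySem.List.slice
    ((List.replicate (PySem.Int.floordiv n pvTemplates.length + 1).toNat pvTemplates).flatten)
    none (some n)

-- ===== PRECONDITION & SPEC =====
def Spec_get_ioi_prompts (n : Int) (out : List String) : Prop := out = get_ioi_prompts_alt n
instance (n : Int) (out : List String) : Decidable (Spec_get_ioi_prompts n out) := by unfold Spec_get_ioi_prompts; infer_instance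

-- ===== CLAIM (what is proved, stated in full; the proofs are below) =====
def Claim_equal_get_ioi_prompts : Prop := ∀ (n : Int), Dom_get_ioi_prompts n → Spec_get_ioi_prompts n (get_ioi_prompts n)

-- ===== LEMMAS AND PROOFS =====

-- A's loop appends exactly (n - len).toNat cycled templates
theorem pvLoopA_eq (n : Int) : ∀ (m : Nat) (prompts : List String) (i : Nat),
    (n - prompts.length).toNat = m →
    pvLoopA n prompts i =
      prompts ++ (List.range m).map (fun j => pvTemplates.getD ((i + j) % 4) "") := by
  intro m
  induction m with
  | zero =>
      intro prompts i hm
      rw [pvLoopA]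
      have : ¬ ((prompts.length : Int) < n) := by omega
      simp [this]
  | succ m' ih =>
      intro prompts i hm
      rw [pvLoopA]
      have hlt : (prompts.length : Int) < n := by omega
      simp only [hlt, if_true]
      rw [ih (prompts ++ [pvTemplates.getD (i % pvTemplates.length) ""]) (i + 1)
           (by simp only [List.length_append, List.length_cons, List.length_nil]; omega)]
      have htail : List.map ((fun j => pvTemplates.getD ((i + j) % 4) "") ∘ Nat.succ) (List.range m')
          = List.map (fun j => pvTemplates.getD ((i + 1 + j) % 4) "") (List.range m') := by
        apply List.map_congr_left
        intro j _
        simp only [Function.comp]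
        congr 2
        omega
      have hlen : pvTemplates.length = 4 := rfl
      rw [List.range_succ_eq_map, List.map_cons, List.map_map, htail, hlen]
      simp

theorem get_ioi_prompts_eq_map (n : Int) :
    get_ioi_prompts n = (List.range n.toNat).map (fun j => pvTemplates.getD (j % 4) "") := by
  rw [get_ioi_prompts, pvLoopA_eq n n.toNat [] 0 (by simp)]
  simp

-- flattening r copies of the 4 templates is the cycled map over 4*r indices
theorem pvFlatten_replicate (r : Nat) :
    (List.replicate r pvTemplates).flatten =
      (List.range (4 * r)).map (fun j => pvTemplates.getD (j % 4) "") := by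
  induction r with
  | zero => simp
  | succ r' ih =>
      rw [List.replicate_succ, List.flatten_cons, ih]
      have h4 : 4 * (r' + 1) = 4 + 4 * r' := by omega
      rw [h4, List.range_add, List.map_append, List.map_map]
      have h1 : (List.range 4).map (fun j => pvTemplates.getD (j % 4) "") = pvTemplates := by decide
      have h2 : List.map ((fun j => pvTemplates.getD (j % 4) "") ∘ fun x => 4 + x) (List.range (4 * r'))
          = List.map (fun j => pvTemplates.getD (j % 4) "") (List.range (4 * r')) := by
        apply List.map_congr_left
        intro j _
        simp [Function.comp, Nat.add_mod_left]
      rw [h1, h2]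

theorem get_ioi_prompts_spec : Claim_equal_get_ioi_prompts := by
  intro n _
  unfold Spec_get_ioi_prompts get_ioi_prompts_alt
  rw [get_ioi_prompts_eq_map, pvFlatten_replicate]
  by_cases hn : 0 ≤ n
  · rw [PySem.List.slice_to _ hn, ← List.map_take, List.take_range]
    congr 2
    have hfd : PySem.Int.floordiv n pvTemplates.length = ((n.toNat / 4 : Nat) : Int) := by
      have : n = ((n.toNat : Nat) : Int) := by omega
      rw [this]
      exact_mod_cast PySem.Int.floordiv_natCast n.toNat 4
    rw [hfd]
    omega
  · have hr : (PySem.Int.floordiv n pvTemplates.length + 1).toNat = 0 := by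
      have hb : (0:Int) < (pvTemplates.length : Int) := by simp [pvTemplates]
      have := PySem.Int.floordiv_mul_add_mod n (pvTemplates.length : Int)
      have hm1 := PySem.Int.mod_nonneg n hb
      have hm2 := PySem.Int.mod_lt n hb
      simp only [pvTemplates, List.length_cons, List.length_nil] at *
      omega
    have hn0 : n.toNat = 0 := by omega
    rw [hr, hn0]
    simp [PySem.List.slice]
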